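-- pv_equiv track=rewrite | github.com/oxidecomputer/quartz | .github/scripts/parse-affected-targets.py | extract_target
-- ===== SOURCE A (Python) =====
-- def extract_target(buck2_run_cmd: str) -> str:
--     """Extract target from 'buck2 run //path:target' or 'buck2 run root//path:target' command"""
--     parts = buck2_run_cmd.split()
--     for part in parts:
--         if part.startswith('root//'):
--             # Strip root// prefix to normalize to //
--             return '//' + part[6:].split()[0]
--         elif part.startswith('//'):
--             return part.split()[0]  # Strip any args
--     return ""
-- ===== SOURCE B (Python) =====
-- def extract_target(buck2_run_cmd: str) -> str:
--     """Single forward scan with an in-token flag: test the prefix right at each token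
--     start instead of splitting the command into a token list first."""
--     s = buck2_run_cmd
--     n = len(s)
--     in_tok = False
--     for i in range(n):
--         ch = s[i]
--         if ch.isspace():
--             in_tok = False
--         elif in_tok:
--             pass
--         elif s.startswith('root//', i):
--             j = i + 6
--             while j < n and not s[j].isspace():
--                 j += 1
--             return '//' + s[i + 6:j]
--         elif s.startswith('//', i):
--             j = i
--             while j < n and not s[j].isspace():
--                 j += 1
--             return s[i:j]
--         else:
--             in_tok = True
--     return ""
-- ===== Notes on version B (the rewrite author's own statement) =====
-- stated objective: alternative
-- what changed: B replaces A's split()-into-a-token-list plus per-token startswith loop with a single forward character scan that carries an in-token flag and tests the prefixes in place at each token start, slicing only the matched token.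
import Mathlib
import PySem

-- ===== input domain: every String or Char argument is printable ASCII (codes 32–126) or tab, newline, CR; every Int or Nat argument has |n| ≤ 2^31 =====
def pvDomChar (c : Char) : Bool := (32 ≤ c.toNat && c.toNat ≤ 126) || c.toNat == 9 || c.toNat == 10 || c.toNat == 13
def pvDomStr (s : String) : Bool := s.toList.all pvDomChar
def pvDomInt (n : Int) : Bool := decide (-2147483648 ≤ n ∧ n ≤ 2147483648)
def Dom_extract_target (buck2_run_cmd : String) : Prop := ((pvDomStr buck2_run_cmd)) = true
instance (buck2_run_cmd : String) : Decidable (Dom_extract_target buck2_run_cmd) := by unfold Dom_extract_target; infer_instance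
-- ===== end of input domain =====

-- B replaces A's split-into-token-list + per-token prefix loop with a single forward
-- character scan (in-token flag) that tests the prefix at each token start in place
-- (objective: alternative; same asymptotic cost).

-- ===== PORT A =====
-- A's per-token loop: the first token starting with 'root//' or '//' decides the result
def extractA : List (List Char) → List Char
  | [] => []                                                        -- return ""
  | p :: rest =>
    if PySem.Chars.startswith p ("root//".toList) then
      -- return '//' + part[6:].split()[0]   (p.drop 6 = part[6:], nonneg slice, exact;
      -- Python's [0] raises on the empty list: excluded by Pre_, headD is a placeholder there)
      "//".toList ++ (PySem.Chars.split₀ (p.drop 6)).headD []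
    else if PySem.Chars.startswith p ("//".toList) then
      (PySem.Chars.split₀ p).headD []                               -- return part.split()[0]
    else extractA rest

def extract_target (buck2_run_cmd : String) : String :=
  String.ofList (extractA (PySem.Chars.split₀ buck2_run_cmd.toList))

-- ===== PORT B =====
-- B's single for-loop over the characters; the Bool is Source B's in_tok flag; the inner
-- `while j < n and not s[j].isspace()` boundary scans are takeWhile of the non-space test
def extractB : Bool → List Char → List Char
  | _, [] => []                                                     -- return ""
  | inTok, c :: rest =>
    if PySem.Chars.isspace c then extractB false rest               -- in_tok = False
    else if inTok then extractB true rest                           -- pass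
    else if PySem.Chars.startswith (c :: rest) ("root//".toList) then
      "//".toList ++ ((c :: rest).drop 6).takeWhile (fun d => !PySem.Chars.isspace d)
    else if PySem.Chars.startswith (c :: rest) ("//".toList) then
      (c :: rest).takeWhile (fun d => !PySem.Chars.isspace d)
    else extractB true rest                                         -- in_tok = True

def extract_target_alt (buck2_run_cmd : String) : String :=
  String.ofList (extractB false buck2_run_cmd.toList)

-- ===== PRECONDITION & SPEC =====
def pvHit (t : List Char) : Bool :=
  PySem.Chars.startswith t ("root//".toList) || PySem.Chars.startswith t ("//".toList)

-- Pre_ excludes exactly the inputs on which A raises IndexError: those whose first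
-- whitespace-separated token starting with 'root//' or '//' is the bare token 'root//'
-- (there part[6:] is '' and ''.split()[0] raises).
def Pre_extract_target (buck2_run_cmd : String) : Prop :=
  (PySem.Chars.split₀ buck2_run_cmd.toList).find? pvHit ≠ some ("root//".toList)
instance (buck2_run_cmd : String) : Decidable (Pre_extract_target buck2_run_cmd) := by
  unfold Pre_extract_target; infer_instance

def pvWitness_extract_target : String := "buck2 run //path:target"

def Spec_extract_target (buck2_run_cmd : String) (out : String) : Prop := out = extract_target_alt buck2_run_cmd
instance (buck2_run_cmd : String) (out : String) : Decidable (Spec_extract_target buck2_run_cmd out) := by unfold Spec_extract_target; infer_instance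

-- ===== CLAIM (what is proved, stated in full; the proofs are below) =====
def Claim_equal_extract_target : Prop := ∀ (buck2_run_cmd : String), Dom_extract_target buck2_run_cmd → Pre_extract_target buck2_run_cmd → Spec_extract_target buck2_run_cmd (extract_target buck2_run_cmd)

-- ===== LEMMAS AND PROOFS =====

-- abbreviation used throughout: the non-space character test
def pvP (d : Char) : Bool := !PySem.Chars.isspace d

lemma pvRootLit : ("root//".toList) = ['r', 'o', 'o', 't', '/', '/'] := by rfl
lemma pvSlashLit : ("//".toList) = ['/', '/'] := by rfl

lemma pvRootP : ∀ d ∈ ("root//".toList), pvP d = true := by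
  rw [pvRootLit]; intro d hd; fin_cases hd <;> decide

lemma pvSlashP : ∀ d ∈ ("//".toList), pvP d = true := by
  rw [pvSlashLit]; intro d hd; fin_cases hd <;> decide

lemma go_acc (cs : List Char) : ∀ cur acc,
    PySem.Chars.split₀.go cs cur acc = acc.reverse ++ PySem.Chars.split₀.go cs cur [] := by
  induction cs with
  | nil => intro cur acc; simp [PySem.Chars.split₀.go]; split <;> simp
  | cons c rest ih =>
    intro cur acc
    simp only [PySem.Chars.split₀.go]
    split
    · split
      · rw [ih [] acc]
      · rw [ih [] (cur.reverse :: acc), ih [] [cur.reverse]]; simp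
    · exact ih _ _

lemma split₀_cons_space {c : Char} (h : PySem.Chars.isspace c = true) (cs : List Char) :
    PySem.Chars.split₀ (c :: cs) = PySem.Chars.split₀ cs := by
  simp [PySem.Chars.split₀, PySem.Chars.split₀.go, h]

lemma go_mid (cs : List Char) : ∀ cur, cur ≠ [] →
    PySem.Chars.split₀.go cs cur [] =
      (cur.reverse ++ cs.takeWhile pvP) :: PySem.Chars.split₀.go (cs.dropWhile pvP) [] [] := by
  induction cs with
  | nil =>
    intro cur hcur
    simp [PySem.Chars.split₀.go, List.isEmpty_iff, hcur]
  | cons c rest ih =>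
    intro cur hcur
    by_cases h : PySem.Chars.isspace c = true
    · simp only [PySem.Chars.split₀.go, h, if_true, List.isEmpty_iff, hcur, if_false]
      rw [go_acc]
      simp [pvP, h, PySem.Chars.split₀.go]
    · simp only [PySem.Chars.split₀.go, h]
      rw [ih (c :: cur) (by simp)]
      simp [pvP, h]

lemma split₀_cons_nospace {c : Char} (h : PySem.Chars.isspace c = false) (cs : List Char) :
    PySem.Chars.split₀ (c :: cs) =
      ((c :: cs).takeWhile pvP) :: PySem.Chars.split₀ ((c :: cs).dropWhile pvP) := by
  show PySem.Chars.split₀.go (c :: cs) [] [] = _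
  simp only [PySem.Chars.split₀.go, h, Bool.false_eq_true, if_false]
  rw [go_mid cs [c] (by simp)]
  simp [pvP, h, PySem.Chars.split₀]

lemma split₀_all_nospace {cs : List Char} (hne : cs ≠ []) (h : ∀ d ∈ cs, pvP d = true) :
    PySem.Chars.split₀ cs = [cs] := by
  obtain ⟨c, cs', rfl⟩ := List.exists_cons_of_ne_nil hne
  have hc : PySem.Chars.isspace c = false := by
    have := h c (by simp); simpa [pvP] using this
  rw [split₀_cons_nospace hc]
  rw [List.takeWhile_eq_self_iff.mpr h, List.dropWhile_eq_nil_iff.mpr (fun x hx => h x hx)]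
  rfl

lemma extractB_skip (tok : List Char) (h : ∀ d ∈ tok, pvP d = true) : ∀ rest,
    extractB true (tok ++ rest) = extractB true rest := by
  induction tok with
  | nil => intro rest; rfl
  | cons x tok' ih =>
    intro rest
    have hx : PySem.Chars.isspace x = false := by
      have := h x (by simp); simpa [pvP] using this
    simp only [List.cons_append, extractB, hx, Bool.false_eq_true, if_false, if_true]
    exact ih (fun d hd => h d (by simp [hd])) rest

lemma pvDropWhile_head_false {p : Char → Bool} :
    ∀ {rest ds : List Char} {d : Char}, rest.dropWhile p = d :: ds → p d = false := by
  intro rest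
  induction rest with
  | nil => intro ds d h; simp [List.dropWhile] at h
  | cons x xs ih =>
    intro ds d h
    by_cases hx : p x = true
    · rw [List.dropWhile_cons_of_pos hx] at h; exact ih h
    · rw [List.dropWhile_cons_of_neg hx] at h
      cases h; simpa using hx

-- main equivalence, by strong induction on the length
lemma main_lemma : ∀ n (cs : List Char), cs.length ≤ n →
    (PySem.Chars.split₀ cs).find? pvHit ≠ some ("root//".toList) →
    extractA (PySem.Chars.split₀ cs) = extractB false cs := by
  intro n
  induction n with
  | zero =>
    intro cs hlen _
    have : cs = [] := List.eq_nil_of_length_eq_zero (Nat.le_zero.mp hlen)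
    subst this; rfl
  | succ n ih =>
    intro cs hlen hpre
    match cs with
    | [] => rfl
    | c :: rest =>
      by_cases hc : PySem.Chars.isspace c = true
      · rw [split₀_cons_space hc] at hpre ⊢
        simp only [extractB, hc, if_true]
        exact ih rest (by simpa using Nat.le_of_succ_le_succ hlen) hpre
      · have hc' : PySem.Chars.isspace c = false := by simpa using hc
        rw [split₀_cons_nospace hc'] at hpre ⊢
        set tok := (c :: rest).takeWhile pvP with htok
        have htokpre : tok <+: (c :: rest) := List.takeWhile_prefix pvP
        have htokP : ∀ d ∈ tok, pvP d = true := fun d hd => List.mem_takeWhile_imp hd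
        by_cases hr : PySem.Chars.startswith (c :: rest) ("root//".toList) = true
        · -- A and B both take the root// branch
          obtain ⟨t, ht⟩ := (PySem.Chars.startswith_iff _ _).mp hr
          have htokeq : tok = ("root//".toList) ++ t.takeWhile pvP := by
            rw [htok, ← ht]; exact List.takeWhile_append_of_pos pvRootP
          have hstok : PySem.Chars.startswith tok ("root//".toList) = true := by
            rw [PySem.Chars.startswith_iff]; exact ⟨t.takeWhile pvP, htokeq.symm⟩
          have hhit : pvHit tok = true := by
            simp only [pvHit, hstok, Bool.true_or]
          have htokne : tok ≠ ("root//".toList) := by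
            intro heq
            apply hpre
            rw [List.find?_cons_of_pos (by rw [hhit]), heq]
          have htne : t.takeWhile pvP ≠ [] := by
            intro h0; apply htokne; rw [htokeq, h0, List.append_nil]
          simp only [extractA, extractB, hstok, if_true, hc', Bool.false_eq_true, if_false, hr]
          rw [htokeq]
          have h6 : ("root//".toList).length = 6 := by rfl
          have hdrop : (("root//".toList) ++ t.takeWhile pvP).drop 6 = t.takeWhile pvP := by
            rw [← h6, List.drop_left]
          rw [hdrop, split₀_all_nospace htne
                (fun d hd => List.mem_takeWhile_imp hd)]
          have : (c :: rest).drop 6 = t := by rw [← ht, ← h6, List.drop_left]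
          rw [this]
          rfl
        · by_cases hs : PySem.Chars.startswith (c :: rest) ("//".toList) = true
          · -- '//' branch
            obtain ⟨t, ht⟩ := (PySem.Chars.startswith_iff _ _).mp hs
            have htokeq : tok = ("//".toList) ++ t.takeWhile pvP := by
              rw [htok, ← ht]; exact List.takeWhile_append_of_pos pvSlashP
            have hstok : PySem.Chars.startswith tok ("//".toList) = true := by
              rw [PySem.Chars.startswith_iff]; exact ⟨t.takeWhile pvP, htokeq.symm⟩
            have hrtok : PySem.Chars.startswith tok ("root//".toList) = false := by
              by_contra h
              have h' : PySem.Chars.startswith tok ("root//".toList) = true := by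
                simpa using h
              have : PySem.Chars.startswith (c :: rest) ("root//".toList) = true := by
                rw [PySem.Chars.startswith_iff] at h' ⊢
                exact h'.trans htokpre
              exact hr this
            have htokne : tok ≠ [] := by
              rw [htokeq]; simp
            simp only [extractA, extractB, hstok, hrtok, Bool.false_eq_true, if_false, if_true,
                       hc', hr, hs]
            rw [split₀_all_nospace htokne htokP]
            rfl
          · -- no match: both skip the token
            have hrtok : PySem.Chars.startswith tok ("root//".toList) = false := by
              by_contra h
              have h' := (PySem.Chars.startswith_iff _ _).mp (by simpa using h)
              exact hr ((PySem.Chars.startswith_iff _ _).mpr (h'.trans htokpre))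
            have hstok : PySem.Chars.startswith tok ("//".toList) = false := by
              by_contra h
              have h' := (PySem.Chars.startswith_iff _ _).mp (by simpa using h)
              exact hs ((PySem.Chars.startswith_iff _ _).mpr (h'.trans htokpre))
            have hhit : pvHit tok = false := by
              simp only [pvHit, hrtok, hstok, Bool.or_false]
            simp only [extractA, extractB, hrtok, hstok, Bool.false_eq_true, if_false, hc',
                       hr, hs]
            rw [List.find?_cons_of_neg (by rw [hhit]; exact Bool.false_ne_true)] at hpre
            -- B walks through the token one char at a time with in_tok = True
            have hrest : rest = rest.takeWhile pvP ++ rest.dropWhile pvP :=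
              (List.takeWhile_append_dropWhile).symm
            have hdw : (c :: rest).dropWhile pvP = rest.dropWhile pvP := by
              simp [pvP, hc']
            rw [hdw] at hpre ⊢
            have hb : extractB true rest = extractB true (rest.dropWhile pvP) := by
              conv_lhs => rw [hrest]
              exact extractB_skip _ (fun d hd => List.mem_takeWhile_imp hd) _
            rw [hb]
            match hdweq : rest.dropWhile pvP with
            | [] => rfl
            | d :: ds =>
              have hd : PySem.Chars.isspace d = true := by
                have := pvDropWhile_head_false hdweq
                simpa [pvP] using this
              rw [hdweq] at hpre
              rw [split₀_cons_space hd] at hpre ⊢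
              simp only [extractB, hd, if_true]
              have hlen' : ds.length ≤ n := by
                have h1 : (rest.dropWhile pvP).length ≤ rest.length := List.length_dropWhile_le _ _
                rw [hdweq] at h1
                simp only [List.length_cons] at h1 hlen
                omega
              exact ih ds hlen' hpre

-- ===== VERDICT (by name: the statement is the Claim_ definition above) =====
theorem extract_target_spec : Claim_equal_extract_target := by
  intro s _ hp
  unfold Spec_extract_target extract_target extract_target_alt
  rw [main_lemma s.toList.length s.toList le_rfl hp]
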